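-- pv_equiv track=rewrite | github.com/theaayushstha1/COSC_352_FALL_2025 | crystal_coke/copy.py | _find_table_rows
-- ===== SOURCE A (Python) =====
-- def _find_table_rows(table_html):
--     """Extract all row elements from table HTML."""
--     rows = []
--     html_lower = table_html.lower()
--     search_pos = 0
--
--     while True:
--         row_start = html_lower.find('<tr', search_pos)
--         if row_start == -1:
--             break
--
--         row_end = html_lower.find('</tr>', row_start)
--         if row_end == -1:
--             break
--
--         row_content = table_html[row_start:row_end + len('</tr>')]
--         rows.append(row_content)
--         search_pos = row_end + len('</tr>')
--
--     return rows
-- ===== SOURCE B (Python) =====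
-- def _find_table_rows(table_html):
--     """Extract all row elements from table HTML (single-pass state machine)."""
--     low = table_html.lower()
--     n = len(low)
--     rows = []
--     start = None  # index where the current row opened, or None when outside a row
--     i = 0
--     while i < n:
--         if start is None:
--             if low[i:i + 3] == '<tr':
--                 start = i
--             i += 1
--         elif low[i:i + 5] == '</tr>':
--             rows.append(table_html[start:i + 5])
--             start = None
--             i += 5
--         else:
--             i += 1
--     return rows
-- ===== Notes on version B (the rewrite author's own statement) =====
-- stated objective: alternative
-- what changed: A's loop of repeated substring-find calls (find the next row-open tag, then find its close tag) is replaced by a single left-to-right state-machine pass that tracks whether a row is currently open and emits each row when its first close tag is reached.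
import Mathlib
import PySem

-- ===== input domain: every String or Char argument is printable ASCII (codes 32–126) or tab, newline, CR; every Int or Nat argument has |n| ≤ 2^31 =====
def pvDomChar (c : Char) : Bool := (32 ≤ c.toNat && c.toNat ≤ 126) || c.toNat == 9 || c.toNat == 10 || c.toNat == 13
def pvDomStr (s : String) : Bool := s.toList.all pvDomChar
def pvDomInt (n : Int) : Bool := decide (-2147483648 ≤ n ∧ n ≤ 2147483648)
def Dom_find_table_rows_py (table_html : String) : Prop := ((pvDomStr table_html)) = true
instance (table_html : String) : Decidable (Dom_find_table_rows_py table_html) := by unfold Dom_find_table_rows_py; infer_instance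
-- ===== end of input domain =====

-- B replaces A's repeated find/find scanning loop by a single left-to-right state-machine pass
-- (objective: alternative — genuinely different control structure, same exact results).

-- ===== PORT A =====
-- '<tr' and '</tr>' as character lists
def pvTr : List Char := ['<', 't', 'r']
def pvClose : List Char := ['<', '/', 't', 'r', '>']

-- A's while-loop: rows accumulator, search_pos.  search_pos starts at 0 and only grows, so it
-- is a Nat; the outer 'pos ≤ length' test is only a totality guard (the loop maintains it:
-- row_end + 5 never exceeds the length when '</tr>' was found).
def pvScanA (cs lcs : List Char) (rows : List (List Char)) (pos : Nat) : List (List Char) :=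
  if hpos : pos ≤ lcs.length then
    -- row_start = html_lower.find('<tr', search_pos)
    if hrs : PySem.Chars.findFrom lcs pvTr (pos : Int) = -1 then rows
    else
      -- row_end = html_lower.find('</tr>', row_start)
      if hre : PySem.Chars.findFrom lcs pvClose (PySem.Chars.findFrom lcs pvTr (pos : Int)) = -1 then rows
      else
        pvScanA cs lcs
          (rows ++ [PySem.Chars.slice cs (some (PySem.Chars.findFrom lcs pvTr (pos : Int)))
                      (some (PySem.Chars.findFrom lcs pvClose (PySem.Chars.findFrom lcs pvTr (pos : Int)) + 5))])
          ((PySem.Chars.findFrom lcs pvClose (PySem.Chars.findFrom lcs pvTr (pos : Int))).toNat + 5)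
  else rows
termination_by lcs.length - pos
decreasing_by
  have h1 := PySem.Chars.findFrom_natCast_spec lcs pvTr pos hpos hrs
  obtain ⟨hle1, hpre1, -⟩ := h1
  have hrs0 : (0:Int) ≤ PySem.Chars.findFrom lcs pvTr (pos : Int) := le_trans (by positivity) hle1
  set r := (PySem.Chars.findFrom lcs pvTr (pos : Int)).toNat with hr
  have hrcast : PySem.Chars.findFrom lcs pvTr (pos : Int) = (r : Int) := (Int.toNat_of_nonneg hrs0).symm
  have hrlen : r + 3 ≤ lcs.length := by
    have := hpre1.length_le
    rw [show pvTr.length = 3 from rfl, List.length_drop] at this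
    omega
  rw [hrcast] at hre ⊢
  have h2 := PySem.Chars.findFrom_natCast_spec lcs pvClose r (by omega) hre
  obtain ⟨hle2, hpre2, -⟩ := h2
  have helen : (PySem.Chars.findFrom lcs pvClose (r : Int)).toNat + 5 ≤ lcs.length := by
    have := hpre2.length_le
    rw [show pvClose.length = 5 from rfl, List.length_drop] at this
    omega
  have hpr : (pos : Int) ≤ (r : Int) := by rw [hrcast] at hle1; exact hle1
  have : pos ≤ r := by exact_mod_cast hpr
  have : r ≤ (PySem.Chars.findFrom lcs pvClose (r : Int)).toNat := by
    have : (r : Int) ≤ (PySem.Chars.findFrom lcs pvClose (r : Int)) := hle2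
    omega
  omega

def find_table_rows_py (table_html : String) : List String :=
  let cs := table_html.toList
  let html_lower := PySem.Chars.lower cs
  (pvScanA cs html_lower [] 0).map String.ofList

-- ===== PORT B =====
-- B's single pass: index i, state 'start' (None = outside a row, some s = row opened at s).
def pvScanB (cs lcs : List Char) (rows : List (List Char)) (i : Nat) (start : Option Nat) :
    List (List Char) :=
  if h : i < lcs.length then
    match start with
    | none =>
      if PySem.Chars.slice lcs (some (i : Int)) (some ((i : Int) + 3)) = pvTr then
        pvScanB cs lcs rows (i + 1) (some i)
      else pvScanB cs lcs rows (i + 1) none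
    | some s =>
      if PySem.Chars.slice lcs (some (i : Int)) (some ((i : Int) + 5)) = pvClose then
        pvScanB cs lcs (rows ++ [PySem.Chars.slice cs (some (s : Int)) (some ((i : Int) + 5))])
          (i + 5) none
      else pvScanB cs lcs rows (i + 1) (some s)
  else rows
termination_by lcs.length - i
decreasing_by all_goals omega

def find_table_rows_py_alt (table_html : String) : List String :=
  let low := PySem.Chars.lower table_html.toList
  (pvScanB table_html.toList low [] 0 none).map String.ofList

-- ===== PRECONDITION & SPEC =====
def Spec_find_table_rows_py (table_html : String) (out : List String) : Prop := out = find_table_rows_py_alt table_html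
instance (table_html : String) (out : List String) : Decidable (Spec_find_table_rows_py table_html out) := by unfold Spec_find_table_rows_py; infer_instance

-- ===== CLAIM (what is proved, stated in full; the proofs are below) =====
def Claim_equal_find_table_rows_py : Prop := ∀ (table_html : String), Dom_find_table_rows_py table_html → Spec_find_table_rows_py table_html (find_table_rows_py table_html)

-- ===== LEMMAS AND PROOFS =====

-- the 3-character (resp. 5-character) slice test equals the prefix test on the dropped list
lemma pvSliceTr_iff (lcs : List Char) (i : Nat) :
    (PySem.Chars.slice lcs (some (i : Int)) (some ((i : Int) + 3)) = pvTr) ↔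
      pvTr <+: lcs.drop i := by
  rw [PySem.Chars.slice_eq_listSlice,
    show ((i : Int) + 3) = ((i : Int) + ((3 : Nat) : Int)) from by norm_num,
    PySem.List.slice_natCast_add, List.prefix_iff_eq_take,
    show pvTr.length = 3 from rfl, eq_comm]

lemma pvSliceClose_iff (lcs : List Char) (i : Nat) :
    (PySem.Chars.slice lcs (some (i : Int)) (some ((i : Int) + 5)) = pvClose) ↔
      pvClose <+: lcs.drop i := by
  rw [PySem.Chars.slice_eq_listSlice,
    show ((i : Int) + 5) = ((i : Int) + ((5 : Nat) : Int)) from by norm_num,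
    PySem.List.slice_natCast_add, List.prefix_iff_eq_take,
    show pvClose.length = 5 from rfl, eq_comm]

lemma pvDrop_le_suffix (lcs : List Char) {i j : Nat} (hij : i ≤ j) :
    lcs.drop j <:+ lcs.drop i := by
  have h : List.drop (j - i) (List.drop i lcs) = List.drop j lcs := by
    rw [List.drop_drop]; congr 1; omega
  rw [← h]
  exact List.drop_suffix (j - i) _

lemma pvInfix_drop_succ {sub lcs : List Char} {i : Nat}
    (h : ¬ sub <:+: lcs.drop i) : ¬ sub <:+: lcs.drop (i + 1) := by
  intro h2
  exact h (h2.trans (pvDrop_le_suffix lcs (Nat.le_succ i)).isInfix)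

-- dead ends: no match ahead, the scan returns the accumulated rows unchanged
lemma pvScanB_none_dead (cs lcs : List Char) (rows : List (List Char)) (i : Nat)
    (hi : ¬ pvTr <:+: lcs.drop i) : pvScanB cs lcs rows i none = rows := by
  rw [pvScanB]
  by_cases h : i < lcs.length
  · rw [dif_pos h]
    have hnm : ¬ (PySem.Chars.slice lcs (some (i : Int)) (some ((i : Int) + 3)) = pvTr) := by
      rw [pvSliceTr_iff]; exact fun hp => hi hp.isInfix
    simp only [if_neg hnm]
    exact pvScanB_none_dead cs lcs rows (i + 1) (pvInfix_drop_succ hi)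
  · rw [dif_neg h]
termination_by lcs.length - i

lemma pvScanB_some_dead (cs lcs : List Char) (rows : List (List Char)) (i s : Nat)
    (hi : ¬ pvClose <:+: lcs.drop i) : pvScanB cs lcs rows i (some s) = rows := by
  rw [pvScanB]
  by_cases h : i < lcs.length
  · rw [dif_pos h]
    have hnm : ¬ (PySem.Chars.slice lcs (some (i : Int)) (some ((i : Int) + 5)) = pvClose) := by
      rw [pvSliceClose_iff]; exact fun hp => hi hp.isInfix
    simp only [if_neg hnm]
    exact pvScanB_some_dead cs lcs rows (i + 1) s (pvInfix_drop_succ hi)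
  · rw [dif_neg h]
termination_by lcs.length - i

-- walking over non-matching positions in the 'outside a row' state
lemma pvScanB_walk_none (cs lcs : List Char) (rows : List (List Char)) (i j : Nat)
    (hij : i ≤ j) (hj : j ≤ lcs.length)
    (hmin : ∀ m, i ≤ m → m < j → ¬ pvTr <+: lcs.drop m) :
    pvScanB cs lcs rows i none = pvScanB cs lcs rows j none := by
  rcases Nat.eq_or_lt_of_le hij with rfl | hlt
  · rfl
  · have hin : i < lcs.length := by omega
    conv_lhs => rw [pvScanB]
    rw [dif_pos hin]
    have hnm : ¬ (PySem.Chars.slice lcs (some (i : Int)) (some ((i : Int) + 3)) = pvTr) := by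
      rw [pvSliceTr_iff]; exact hmin i le_rfl hlt
    simp only [if_neg hnm]
    exact pvScanB_walk_none cs lcs rows (i + 1) j hlt hj
      (fun m hm hmj => hmin m (by omega) hmj)
termination_by j - i

-- walking in the 'inside a row' state up to the first '</tr>' match, then emitting the row
lemma pvScanB_walk_some (cs lcs : List Char) (rows : List (List Char)) (s i e : Nat)
    (hie : i ≤ e) (hm : pvClose <+: lcs.drop e)
    (hmin : ∀ m, i ≤ m → m < e → ¬ pvClose <+: lcs.drop m) :
    pvScanB cs lcs rows i (some s) =
      pvScanB cs lcs (rows ++ [PySem.Chars.slice cs (some (s : Int)) (some ((e : Int) + 5))])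
        (e + 5) none := by
  have helen : e + 5 ≤ lcs.length := by
    have := hm.length_le
    rw [show pvClose.length = 5 from rfl, List.length_drop] at this
    omega
  have hin : i < lcs.length := by omega
  rcases Nat.eq_or_lt_of_le hie with rfl | hlt
  · conv_lhs => rw [pvScanB]
    rw [dif_pos hin]
    simp only [if_pos ((pvSliceClose_iff lcs i).mpr hm)]
  · conv_lhs => rw [pvScanB]
    rw [dif_pos hin]
    have hnm : ¬ (PySem.Chars.slice lcs (some (i : Int)) (some ((i : Int) + 5)) = pvClose) := by
      rw [pvSliceClose_iff]; exact hmin i le_rfl hlt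
    simp only [if_neg hnm]
    exact pvScanB_walk_some cs lcs rows s (i + 1) e hlt hm
      (fun m hm2 hme => hmin m (by omega) hme)
termination_by e - i

-- the two scanners agree
lemma pvScanAB (cs lcs : List Char) (rows : List (List Char)) (pos : Nat)
    (hpos : pos ≤ lcs.length) :
    pvScanA cs lcs rows pos = pvScanB cs lcs rows pos none := by
  rw [pvScanA, dif_pos hpos]
  by_cases hrs : PySem.Chars.findFrom lcs pvTr (pos : Int) = -1
  · rw [dif_pos hrs]
    rw [PySem.Chars.findFrom_natCast_eq_neg_one_iff lcs pvTr pos hpos] at hrs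
    exact (pvScanB_none_dead cs lcs rows pos hrs).symm
  · rw [dif_neg hrs]
    obtain ⟨hle1, hpre1, hmin1⟩ := PySem.Chars.findFrom_natCast_spec lcs pvTr pos hpos hrs
    have hrs0 : (0 : Int) ≤ PySem.Chars.findFrom lcs pvTr (pos : Int) :=
      le_trans (by positivity) hle1
    set r := (PySem.Chars.findFrom lcs pvTr (pos : Int)).toNat with hrdef
    have hrcast : PySem.Chars.findFrom lcs pvTr (pos : Int) = (r : Int) :=
      (Int.toNat_of_nonneg hrs0).symm
    have hposr : pos ≤ r := by
      have : (pos : Int) ≤ (r : Int) := by rw [← hrcast]; exact hle1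
      exact_mod_cast this
    have hrlen : r + 3 ≤ lcs.length := by
      have := hpre1.length_le
      rw [show pvTr.length = 3 from rfl, List.length_drop] at this
      omega
    -- B walks up to r without opening a row
    have hwalk1 : pvScanB cs lcs rows pos none = pvScanB cs lcs rows r none :=
      pvScanB_walk_none cs lcs rows pos r hposr (by omega) hmin1
    -- at r the row opens
    have hopen : pvScanB cs lcs rows r none = pvScanB cs lcs rows (r + 1) (some r) := by
      have hrn : r < lcs.length := by omega
      conv_lhs => rw [pvScanB]
      rw [dif_pos hrn]
      simp only [if_pos ((pvSliceTr_iff lcs r).mpr hpre1)]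
    -- no '</tr>' can start at r itself: lcs.drop r starts with '<tr'
    have hnocl : ¬ pvClose <+: lcs.drop r := by
      intro hcl
      obtain ⟨t1, h1⟩ := hpre1
      obtain ⟨t2, h2⟩ := hcl
      rw [← h1] at h2
      simp [pvTr, pvClose] at h2
    rw [hrcast] at hrs ⊢
    by_cases hre : PySem.Chars.findFrom lcs pvClose (r : Int) = -1
    · rw [dif_pos hre]
      rw [PySem.Chars.findFrom_natCast_eq_neg_one_iff lcs pvClose r (by omega)] at hre
      rw [hwalk1, hopen,
        pvScanB_some_dead cs lcs rows (r + 1) r (pvInfix_drop_succ hre)]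
    · rw [dif_neg hre]
      obtain ⟨hle2, hpre2, hmin2⟩ :=
        PySem.Chars.findFrom_natCast_spec lcs pvClose r (by omega) hre
      have hre0 : (0 : Int) ≤ PySem.Chars.findFrom lcs pvClose (r : Int) :=
        le_trans (by positivity) hle2
      set e := (PySem.Chars.findFrom lcs pvClose (r : Int)).toNat with hedef
      have hecast : PySem.Chars.findFrom lcs pvClose (r : Int) = (e : Int) :=
        (Int.toNat_of_nonneg hre0).symm
      have hre' : r ≤ e := by
        have : (r : Int) ≤ (e : Int) := by rw [← hecast]; exact hle2
        exact_mod_cast this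
      have hene : r ≠ e := fun h => hnocl (h ▸ hpre2)
      have helen : e + 5 ≤ lcs.length := by
        have := hpre2.length_le
        rw [show pvClose.length = 5 from rfl, List.length_drop] at this
        omega
      have hwalk2 : pvScanB cs lcs rows (r + 1) (some r) =
          pvScanB cs lcs
            (rows ++ [PySem.Chars.slice cs (some (r : Int)) (some ((e : Int) + 5))])
            (e + 5) none :=
        pvScanB_walk_some cs lcs rows r (r + 1) e (by omega) hpre2
          (fun m hm hme => hmin2 m (by omega) hme)
      rw [hwalk1, hopen, hwalk2, hecast]
      exact pvScanAB cs lcs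
        (rows ++ [PySem.Chars.slice cs (some (r : Int)) (some ((e : Int) + 5))]) (e + 5) helen
termination_by lcs.length - pos
decreasing_by
  rw [← hrdef, ← hedef]
  omega

-- ===== VERDICT (by name: the statement is the Claim_ definition above) =====
theorem find_table_rows_py_spec : Claim_equal_find_table_rows_py := by
  intro s _
  unfold Spec_find_table_rows_py find_table_rows_py find_table_rows_py_alt
  simp only []
  rw [pvScanAB _ _ _ 0 (Nat.zero_le _)]
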